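-- pv_equiv track=rewrite | github.com/miliar/Code_Jam_Webscraper | Solutions_python/Problem_138/1461.py | solve_war
-- ===== SOURCE A (Python) =====
-- def solve_war(n_masses, k_masses):
-- 	points = 0
-- 	n_masses.sort(reverse=True)
-- 	k_masses.sort(reverse=True)
--
-- 	def smallest_winner(n_mass):
-- 		smallest_winner = 0
-- 		for idx, mass in enumerate(k_masses):
-- 			if mass < n_mass:
-- 				return smallest_winner
-- 			else:
-- 				smallest_winner = idx
--
-- 		return smallest_winner
--
-- 	idx = 0
-- 	while n_masses:
-- 		if n_masses[idx] > k_masses[idx]: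
-- 			points += 1
-- 			k_masses.pop()
-- 			n_masses.pop(0)
-- 		else:
-- 			k_masses.pop(smallest_winner(n_masses[0]))
-- 			n_masses.pop(0)
--
-- 	return points
-- ===== SOURCE B (Python) =====
-- def solve_war(n_masses, k_masses):
--     # One linear two-pointer sweep over the two descending-sorted lists:
--     # j counts Ken's "sacrificed" top blocks; Naomi scores when her next
--     # block beats Ken's j-th largest remaining block.
--     ns = sorted(n_masses, reverse=True)
--     ks = sorted(k_masses, reverse=True)
--     points = 0
--     j = 0
--     for n in ns:
--         if n > ks[j]:
--             points += 1
--         else: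
--             j += 1
--     return points
-- ===== Notes on version B (the rewrite author's own statement) =====
-- stated objective: faster
-- what changed: Replaced the quadratic mutate-and-rescan loop (which re-scans Ken's list for the smallest winner and pops from both lists each round) by a sort followed by a single linear two-pointer sweep that never mutates the lists.
import Mathlib
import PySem

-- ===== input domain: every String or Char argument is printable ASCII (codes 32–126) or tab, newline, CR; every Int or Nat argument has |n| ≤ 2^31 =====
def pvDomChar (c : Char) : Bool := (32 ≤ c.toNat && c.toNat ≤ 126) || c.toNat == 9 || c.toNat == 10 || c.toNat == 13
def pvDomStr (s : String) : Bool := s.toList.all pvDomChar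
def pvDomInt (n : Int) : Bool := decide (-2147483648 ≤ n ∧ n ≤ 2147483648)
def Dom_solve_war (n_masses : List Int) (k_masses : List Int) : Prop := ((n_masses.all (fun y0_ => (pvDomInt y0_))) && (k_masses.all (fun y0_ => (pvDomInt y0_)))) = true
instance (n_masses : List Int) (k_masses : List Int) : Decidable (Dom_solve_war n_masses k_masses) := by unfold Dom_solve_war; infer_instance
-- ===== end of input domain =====

-- B replaces A's quadratic pop-and-rescan loop by a single two-pointer sweep over the
-- sorted lists (faster, O(n log n)); equivalence is about the RETURN value only — A sorts
-- and empties its argument lists in place, B does not mutate them.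

-- ===== PORT A =====
-- the inner 'smallest_winner' loop over enumerate(k_masses)
def swGo (n_mass : Int) : List (Int × Int) → Int → Int
  | [], s => s
  | (idx, mass) :: rest, s => if mass < n_mass then s else swGo n_mass rest idx

def smallestWinnerA (k_masses : List Int) (n_mass : Int) : Int :=
  swGo n_mass (PySem.List.enumerate k_masses) 0

-- the 'while n_masses:' loop; idx stays 0 in A, so n_masses[idx]/k_masses[idx] are the heads;
-- 'k_masses.pop()' / 'k_masses.pop(m)' via PySem.List.pop? (none = IndexError, unreachable here)
def loopA : List Int → List Int → Int → Int
  | [], _, points => points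
  | n0 :: nrest, k, points =>
    match PySem.List.pyGet? k (0 : Int) with
    | none => points    -- Python raises IndexError here (k exhausted); excluded by Pre_
    | some k0 =>
      if n0 > k0 then
        loopA nrest (((PySem.List.pop? k (-1)).map (·.2)).getD k) (points + 1)
      else
        loopA nrest (((PySem.List.pop? k (smallestWinnerA k n0)).map (·.2)).getD k) points

def solve_war (n_masses : List Int) (k_masses : List Int) : Int :=
  loopA (PySem.List.sorted n_masses id true) (PySem.List.sorted k_masses id true) 0

-- ===== PORT B =====
def solve_war_alt (n_masses : List Int) (k_masses : List Int) : Int :=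
  let ns := PySem.List.sorted n_masses id true
  let ks := PySem.List.sorted k_masses id true
  (ns.foldl (fun (st : Int × Nat) n =>
      match PySem.List.pyGet? ks (st.2 : Int) with
      | none => st    -- Python raises IndexError here; unreachable under Pre_
      | some kj => if n > kj then (st.1 + 1, st.2) else (st.1, st.2 + 1))
    (0, 0)).1

-- ===== PRECONDITION & SPEC =====
-- A raises IndexError (k_masses[0] on an emptied list) exactly when Ken has fewer masses
-- than Naomi; B's ks[j] raises there too.
def Pre_solve_war (n_masses : List Int) (k_masses : List Int) : Prop :=
  n_masses.length ≤ k_masses.length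
instance (n_masses : List Int) (k_masses : List Int) : Decidable (Pre_solve_war n_masses k_masses) := by
  unfold Pre_solve_war; infer_instance

def pvWitness_solve_war : List Int × List Int := ([3, 1, 6], [2, 4, 5])

def Spec_solve_war (n_masses : List Int) (k_masses : List Int) (out : Int) : Prop :=
  out = solve_war_alt n_masses k_masses
instance (n_masses : List Int) (k_masses : List Int) (out : Int) : Decidable (Spec_solve_war n_masses k_masses out) := by
  unfold Spec_solve_war; infer_instance

-- ===== CLAIM (what is proved, stated in full; the proofs are below) =====
def Claim_equal_solve_war : Prop := ∀ (n_masses : List Int) (k_masses : List Int), Dom_solve_war n_masses k_masses → Pre_solve_war n_masses k_masses → Spec_solve_war n_masses k_masses (solve_war n_masses k_masses)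

-- ===== LEMMAS AND PROOFS =====

-- structural form of B's two-pointer sweep: the pointer j becomes 'drop' on Ken's list
def countB : List Int → List Int → Int
  | [], _ => 0
  | _ :: _, [] => 0
  | n0 :: nr, k0 :: kr => if n0 > k0 then 1 + countB nr (k0 :: kr) else countB nr kr

-- countB never looks at the last element of K when K is strictly longer than n
theorem countB_dropLast : ∀ (n K : List Int), n.length < K.length →
    countB n K.dropLast = countB n K := by
  intro n
  induction n with
  | nil => intro K _; rfl
  | cons n0 nr ih =>
    intro K hlen
    match K with
    | [] => simp at hlen
    | [k0] => simp at hlen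
    | k0 :: k1 :: kr =>
      have hd : (k0 :: k1 :: kr).dropLast = k0 :: (k1 :: kr).dropLast := rfl
      rw [hd]
      by_cases h : n0 > k0
      · simp only [countB, if_pos h]
        rw [← hd, ih (k0 :: k1 :: kr)]
        simp at hlen ⊢; omega
      · simp only [countB, if_neg h]
        exact ih (k1 :: kr) (by simp at hlen ⊢; omega)

-- replacing the first m elements of K by other values that are all ≥ every element of n
-- does not change countB (all those comparisons lose)
theorem countB_prefix_big (c : Int) : ∀ (n : List Int) (m : Nat) (K K' : List Int),
    K.length = K'.length → K.drop m = K'.drop m →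
    (∀ x ∈ K.take m, c ≤ x) → (∀ x ∈ K'.take m, c ≤ x) →
    (∀ x ∈ n, x ≤ c) →
    countB n K = countB n K' := by
  intro n
  induction n with
  | nil => intro m K K' _ _ _ _ _; cases K <;> cases K' <;> simp [countB]
  | cons n0 nr ih =>
    intro m K K' hlen hdrop hK hK' hn
    match m with
    | 0 => simp at hdrop; rw [hdrop]
    | m' + 1 =>
      match K, K' with
      | [], K' =>
        have hnil : K' = [] := by cases K' <;> simp_all
        subst hnil; rfl
      | k0 :: kr, [] => simp at hlen
      | k0 :: kr, k0' :: kr' =>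
        have hck0 : c ≤ k0 := hK k0 (by simp)
        have hck0' : c ≤ k0' := hK' k0' (by simp)
        have hn0 : n0 ≤ c := hn n0 (by simp)
        have h1 : ¬ n0 > k0 := by omega
        have h2 : ¬ n0 > k0' := by omega
        simp only [countB, if_neg h1, if_neg h2]
        refine ih m' kr kr' (by simpa using hlen) (by simpa using hdrop) ?_ ?_ ?_
        · intro x hx; exact hK x (by simp [hx])
        · intro x hx; exact hK' x (by simp [hx])
        · intro x hx; exact hn x (by simp [hx])

-- the smallest_winner scan returns a valid index m of k with n0 ≤ k[m],
-- provided the accumulator already satisfies that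
theorem swGo_spec (n0 : Int) (k : List Int) :
    ∀ (t : List Int) (i s : Nat), t = k.drop i → (hs : s < k.length) → n0 ≤ k[s] →
    ∃ (m : Nat) (hm : m < k.length),
      swGo n0 (PySem.List.enumerate t (i : Int)) (s : Int) = (m : Int) ∧ n0 ≤ k[m] := by
  intro t
  induction t with
  | nil => intro i s _ hs hval; exact ⟨s, hs, by simp [PySem.List.enumerate, swGo], hval⟩
  | cons mass rest ih =>
    intro i s ht hs hval
    have hi : i < k.length := by
      have : (k.drop i).length ≠ 0 := by rw [← ht]; simp
      simp at this; omega
    have hmass : mass = k[i] := by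
      have h0 : (k.drop i)[0]'(by rw [← ht]; simp) = k[i] := by
        rw [List.getElem_drop]; congr 1
      rw [← h0]; simp [← ht]
    have hrest : rest = k.drop (i + 1) := by
      have hdd : (k.drop i).drop 1 = k.drop (i + 1) := List.drop_drop
      rw [← hdd, ← ht]; rfl
    rw [PySem.List.enumerate_cons]
    by_cases hlt : mass < n0
    · exact ⟨s, hs, by simp [swGo, hlt], hval⟩
    · have := ih (i + 1) i hrest hi (by rw [← hmass]; omega)
      obtain ⟨m, hm, heq, hv⟩ := this
      refine ⟨m, hm, ?_, hv⟩
      simp only [swGo, if_neg hlt]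
      rw [← heq]; norm_cast

-- A's loop equals the structural two-pointer count on sorted-descending lists
theorem loopA_eq : ∀ (n : List Int) (k : List Int) (p : Int),
    n.Pairwise (fun a b => b ≤ a) → k.Pairwise (fun a b => b ≤ a) →
    n.length ≤ k.length →
    loopA n k p = p + countB n k := by
  intro n
  induction n with
  | nil => intro k p _ _ _; simp [loopA, countB]
  | cons n0 nr ih =>
    intro k p hn hk hlen
    match k with
    | [] => simp at hlen
    | k0 :: kr =>
      have hget : PySem.List.pyGet? (k0 :: kr) (0 : Int) = some k0 := by
        simp [PySem.List.pyGet?, PySem.List.pyIdx?]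
      by_cases hwin : n0 > k0
      · -- win: pop Ken's last, score a point
        have hpop : ((PySem.List.pop? (k0 :: kr) (-1)).map (·.2)).getD (k0 :: kr)
            = (k0 :: kr).dropLast := by
          rcases List.eq_nil_or_concat (k0 :: kr) with h | ⟨ys, y, hk⟩
          · simp at h
          · rw [hk, List.concat_eq_append, PySem.List.pop?_last]; simp
        simp only [loopA, hget, if_pos hwin, hpop]
        rw [ih ((k0 :: kr).dropLast) (p + 1) hn.tail
            (hk.sublist (List.dropLast_sublist _))
            (by simp at hlen ⊢; omega)]
        rw [countB_dropLast nr (k0 :: kr) (by simp at hlen ⊢; omega)]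
        simp only [countB, if_pos hwin]; ring
      · -- lose: pop Ken's smallest winner
        have hk0 : n0 ≤ k0 := by omega
        obtain ⟨m, hm, heq, hval⟩ :=
          swGo_spec n0 (k0 :: kr) (k0 :: kr) 0 0 (by simp) (by simp) (by simpa using hk0)
        have hswa : smallestWinnerA (k0 :: kr) n0 = (m : Int) := by
          simpa [smallestWinnerA] using heq
        have hpop : ((PySem.List.pop? (k0 :: kr) (smallestWinnerA (k0 :: kr) n0)).map (·.2)).getD (k0 :: kr)
            = (k0 :: kr).eraseIdx m := by
          rw [hswa, PySem.List.pop?_natCast (k0 :: kr) m hm]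
          simp
        simp only [loopA, hget, if_neg hwin, hpop]
        have hmono : ∀ (j : Nat) (hj : j ≤ m), n0 ≤ (k0 :: kr)[j]'(by omega) := by
          intro j hj
          rcases Nat.lt_or_ge j m with hjm | hjm
          · have := (List.pairwise_iff_getElem.mp hk) j m (by omega) hm hjm
            omega
          · have hjm' : j = m := by omega
            subst hjm'; exact hval
        have hsub : (k0 :: kr).eraseIdx m = (k0 :: kr).take m ++ (k0 :: kr).drop (m + 1) :=
          List.eraseIdx_eq_take_drop_succ (k0 :: kr) m
        have hlen' : ((k0 :: kr).eraseIdx m).length = kr.length := by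
          rw [List.length_eraseIdx, if_pos hm]; simp
        rw [ih ((k0 :: kr).eraseIdx m) p hn.tail
            (hk.sublist (List.eraseIdx_sublist _ _))
            (by rw [hlen']; simp at hlen; omega)]
        have hcnt : countB nr ((k0 :: kr).eraseIdx m) = countB nr kr := by
          refine countB_prefix_big n0 nr m ((k0 :: kr).eraseIdx m) kr (by rw [hlen']) ?_ ?_ ?_ ?_
          · -- drops agree
            rw [hsub, List.drop_append_of_le_length (by simp at hm ⊢; omega)]
            simp
          · -- prefix of eraseIdx: the first m elements of (k0 :: kr), all ≥ n0
            intro x hx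
            rw [hsub, List.take_append_of_le_length (by simp at hm ⊢; omega)] at hx
            rw [List.take_take, min_self] at hx
            obtain ⟨j, hj, hxj⟩ := List.mem_take_iff_getElem.mp hx
            rw [← hxj]
            exact hmono j (by omega)
          · -- prefix of kr: elements at indices 1..m of (k0 :: kr), all ≥ n0
            intro x hx
            obtain ⟨j, hj, hxj⟩ := List.mem_take_iff_getElem.mp hx
            have hj' : j + 1 ≤ m := by omega
            have hg : kr[j]'(by simp at hm; omega) = (k0 :: kr)[j + 1]'(by omega) := by
              simp
            rw [← hxj, hg]
            exact hmono (j + 1) hj'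
          · intro x hx
            exact (List.pairwise_cons.mp hn).1 x hx
        rw [hcnt]
        simp only [countB, if_neg hwin]

-- B's foldl with pointer j equals countB on Ken's list with the first j elements dropped
theorem foldB_eq (ks : List Int) : ∀ (ns : List Int) (p : Int) (j : Nat),
    j + ns.length ≤ ks.length →
    (ns.foldl (fun (st : Int × Nat) n =>
        match PySem.List.pyGet? ks (st.2 : Int) with
        | none => st
        | some kj => if n > kj then (st.1 + 1, st.2) else (st.1, st.2 + 1))
      (p, j)).1 = p + countB ns (ks.drop j) := by
  intro ns
  induction ns with
  | nil => intro p j _; cases h : ks.drop j <;> simp [countB]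
  | cons n0 nr ih =>
    intro p j hlen
    have hj : j < ks.length := by simp at hlen; omega
    have hget : PySem.List.pyGet? ks (j : Int) = some (ks[j]'hj) := by
      rw [PySem.List.pyGet?_natCast]; simp [hj]
    have hdropj : ks.drop j = ks[j]'hj :: ks.drop (j + 1) :=
      List.drop_eq_getElem_cons hj
    simp only [List.foldl_cons, hget]
    by_cases hwin : n0 > ks[j]'hj
    · simp only [if_pos hwin]
      rw [ih (p + 1) j (by simp at hlen ⊢; omega)]
      rw [hdropj]
      simp only [countB, if_pos hwin]
      rw [← hdropj]; ring
    · simp only [if_neg hwin]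
      rw [ih p (j + 1) (by simp at hlen ⊢; omega)]
      rw [hdropj]
      simp only [countB, if_neg hwin]

-- ===== VERDICT (by name: the statement is the Claim_ definition above) =====
theorem solve_war_spec : Claim_equal_solve_war := by
  intro n_masses k_masses _hdom hpre
  unfold Spec_solve_war solve_war solve_war_alt
  set ns := PySem.List.sorted n_masses id true with hns
  set ks := PySem.List.sorted k_masses id true with hks
  have hlen : ns.length ≤ ks.length := by
    rw [hns, hks, PySem.List.length_sorted, PySem.List.length_sorted]
    exact hpre
  rw [loopA_eq ns ks 0
      (PySem.List.sorted_pairwise_rev n_masses id)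
      (PySem.List.sorted_pairwise_rev k_masses id) hlen]
  rw [foldB_eq ks ns 0 0 (by simpa using hlen)]
  simp
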